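-- pv_equiv track=rewrite | github.com/RubenGenillo/examen_ordinaria | ejercicio3.py | numbersOfLetters
-- ===== SOURCE A (Python) =====
-- def obtener_nombre(n):
--     numero = str(n)
--     listanum = [*numero]
--     listaletras = []
--     dict = {
--         0: "zero",
--         1: "one",
--         2: "two",
--         3: "three",
--         4: "four",
--         5: "five",
--         6: "six",
--         7: "seven",
--         8: "eight",
--         9: "nine",
--     }
--
--     for elemento in listanum:
--         listaletras.append(dict.get(int(elemento)))
--
--     return("".join(listaletras))
--
-- def numbersOfLetters(n):
--     listanombres = []
--     nombre = obtener_nombre(n)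
--     listanombres.append(nombre)
--     while len(listanombres[-1]) != 4:
--         numero_actual = len(listanombres[-1])
--         nombre = obtener_nombre(numero_actual)
--         listanombres.append(nombre)
--     listanombres.append("four")
--     return listanombres
-- ===== SOURCE B (Python) =====
-- _NAMES = ["zero", "one", "two", "three", "four", "five", "six", "seven", "eight", "nine"]
--
--
-- def _spell(n):
--     if n < 10:
--         return _NAMES[n]
--     return _spell(n // 10) + _NAMES[n % 10]
--
--
-- def numbersOfLetters(n):
--     nombre = _spell(n)
--     if len(nombre) == 4:
--         return [nombre, "four"]
--     return [nombre] + numbersOfLetters(len(nombre))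
-- ===== Notes on version B (the rewrite author's own statement) =====
-- stated objective: simpler
-- what changed: A spells a number by converting it to str and mapping each character through a digit dict, and builds the sequence with a while loop over listanombres[-1]; B spells by arithmetic divmod recursion over the digits and builds the sequence by direct recursion on the spelled length, the duplicated final element coming from the base case.
import Mathlib
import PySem

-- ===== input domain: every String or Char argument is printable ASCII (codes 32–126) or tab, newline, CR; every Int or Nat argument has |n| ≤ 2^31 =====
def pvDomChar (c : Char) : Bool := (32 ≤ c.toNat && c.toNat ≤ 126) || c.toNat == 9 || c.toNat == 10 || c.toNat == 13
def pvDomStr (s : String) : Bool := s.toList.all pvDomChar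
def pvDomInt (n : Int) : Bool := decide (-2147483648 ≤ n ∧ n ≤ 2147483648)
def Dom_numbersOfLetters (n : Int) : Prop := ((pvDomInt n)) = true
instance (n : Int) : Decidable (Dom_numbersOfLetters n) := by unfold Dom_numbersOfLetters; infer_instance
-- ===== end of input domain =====

-- B replaces A's str(n)-and-dict digit spelling by arithmetic divmod recursion and A's
-- while-loop over listanombres[-1] by direct recursion on the spelled length (objective: simpler).

-- ===== PORT A =====
def pvDigitDict : PySem.Dict Int String :=
  PySem.Dict.ofList [(0, "zero"), (1, "one"), (2, "two"), (3, "three"), (4, "four"),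
                     (5, "five"), (6, "six"), (7, "seven"), (8, "eight"), (9, "nine")]

-- int(elemento) then dict.get(...); the two `.getD ""` arms are totality guards only
-- reachable for n < 0 (there Python's int('-') raises ValueError — excluded by Pre_).
def pvLetra (elemento : Char) : String :=
  match PySem.Int.ofChars? [elemento] with
  | some d => (pvDigitDict.get? d).getD ""
  | none => ""

def obtener_nombre (n : Int) : String :=
  let numero := PySem.Int.toChars n
  let listaletras := numero.foldl (fun acc elemento => acc ++ [pvLetra elemento]) ([] : List String)
  PySem.Str.join "" listaletras

-- the while-loop; fuel is a totality guard only (6 iterations suffice on the domain)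
def nolLoop (fuel : Nat) (listanombres : List String) : List String :=
  match fuel with
  | 0 => listanombres
  | fuel+1 =>
    if PySem.Str.len ((PySem.List.pyGet? listanombres (-1)).getD "") ≠ 4 then
      let numero_actual : Int := PySem.Str.len ((PySem.List.pyGet? listanombres (-1)).getD "")
      nolLoop fuel (listanombres ++ [obtener_nombre numero_actual])
    else listanombres

def numbersOfLetters (n : Int) : List String :=
  nolLoop 100 [obtener_nombre n] ++ ["four"]

-- ===== PORT B =====
def pvNames : List String :=
  ["zero", "one", "two", "three", "four", "five", "six", "seven", "eight", "nine"]

-- _spell of Source B; fuel is a totality guard only (numbers on the domain have ≤ 10 digits)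
def pvSpell (fuel : Nat) (n : Int) : String :=
  match fuel with
  | 0 => ""
  | fuel+1 =>
    if n < 10 then (PySem.List.pyGet? pvNames n).getD ""
    else pvSpell fuel (PySem.Int.floordiv n 10) ++
         (PySem.List.pyGet? pvNames (PySem.Int.mod n 10)).getD ""

-- numbersOfLetters of Source B; fuel is a totality guard only
def nolAlt (fuel : Nat) (n : Int) : List String :=
  match fuel with
  | 0 => []
  | fuel+1 =>
    let nombre := pvSpell 12 n
    if PySem.Str.len nombre = 4 then [nombre, "four"]
    else nombre :: nolAlt fuel (PySem.Str.len nombre)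

def numbersOfLetters_alt (n : Int) : List String := nolAlt 100 n

-- ===== PRECONDITION & SPEC =====
-- For n < 0, str(n) starts with '-' and A's int('-') raises ValueError; Pre_ excludes exactly those.
def Pre_numbersOfLetters (n : Int) : Prop := 0 ≤ n
instance (n : Int) : Decidable (Pre_numbersOfLetters n) := by unfold Pre_numbersOfLetters; infer_instance
def pvWitness_numbersOfLetters : Int := (7)

def Spec_numbersOfLetters (n : Int) (out : List String) : Prop := out = numbersOfLetters_alt n
instance (n : Int) (out : List String) : Decidable (Spec_numbersOfLetters n out) := by unfold Spec_numbersOfLetters; infer_instance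

-- ===== CLAIM (what is proved, stated in full; the proofs are below) =====
def Claim_equal_numbersOfLetters : Prop := ∀ (n : Int), Dom_numbersOfLetters n → Pre_numbersOfLetters n → Spec_numbersOfLetters n (numbersOfLetters n)

-- ===== LEMMAS AND PROOFS =====

theorem pv_core_acc : ∀ (f n : Nat) (l : List Char),
    Nat.toDigitsCore 10 f n l = Nat.toDigitsCore 10 f n [] ++ l := by
  intro f
  induction f with
  | zero => intro n l; simp [Nat.toDigitsCore]
  | succ f ih =>
    intro n l
    simp only [Nat.toDigitsCore]
    by_cases h : n / 10 = 0
    · simp [h]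
    · simp only [h, if_false]
      rw [ih (n/10) (Nat.digitChar (n % 10) :: l), ih (n/10) [Nat.digitChar (n % 10)]]
      simp

theorem pv_core_stable : ∀ (f₁ : Nat), ∀ (f₂ n : Nat), n < f₁ → n < f₂ →
    Nat.toDigitsCore 10 f₁ n [] = Nat.toDigitsCore 10 f₂ n [] := by
  intro f₁
  induction f₁ with
  | zero => omega
  | succ f ih =>
    intro f₂ n h1 h2
    cases f₂ with
    | zero => omega
    | succ f₂ =>
      simp only [Nat.toDigitsCore]
      by_cases h : n / 10 = 0
      · simp [h]
      · simp only [h, if_false]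
        rw [pv_core_acc f, pv_core_acc f₂]
        have : n / 10 < n := Nat.div_lt_self (by omega) (by omega)
        rw [ih f₂ (n/10) (by omega) (by omega)]

theorem pv_toDigits_step (n : Nat) (h : 10 ≤ n) :
    Nat.toDigits 10 n = Nat.toDigits 10 (n / 10) ++ [Nat.digitChar (n % 10)] := by
  have h0 : n / 10 ≠ 0 := by
    have := Nat.div_le_div_right (c := 10) h
    simp at this; omega
  show Nat.toDigitsCore 10 (n+1) n [] = _
  simp only [Nat.toDigitsCore, h0, if_false]
  rw [pv_core_acc]
  have : n / 10 < n := Nat.div_lt_self (by omega) (by omega)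
  rw [pv_core_stable n (n/10+1) (n/10) (by omega) (by omega)]
  rfl

theorem pv_toDigits_single (n : Nat) (h : n < 10) :
    Nat.toDigits 10 n = [Nat.digitChar n] := by
  show Nat.toDigitsCore 10 (n+1) n [] = _
  simp [Nat.toDigitsCore, Nat.div_eq_of_lt h, Nat.mod_eq_of_lt h]

theorem pv_join_singleton_append : ∀ (l : List (List Char)) (x : List Char),
    PySem.Chars.join [] (l ++ [x]) = PySem.Chars.join [] l ++ x := by
  intro l
  induction l with
  | nil => intro x; simp [PySem.Chars.join_singleton, PySem.Chars.join_nil]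
  | cons a l ih =>
    intro x
    cases l with
    | nil => simp [PySem.Chars.join_singleton, PySem.Chars.join_cons_cons]
    | cons b t =>
      simp only [List.cons_append, PySem.Chars.join_cons_cons]
      rw [← List.cons_append, ih x]
      simp

theorem pv_toChars_step (n : Int) (h : 10 ≤ n) :
    PySem.Int.toChars n =
      PySem.Int.toChars (PySem.Int.floordiv n 10) ++ PySem.Int.toChars (PySem.Int.mod n 10) := by
  obtain ⟨m, rfl⟩ : ∃ m : Nat, n = (m : Int) := ⟨n.toNat, by omega⟩
  have hm : 10 ≤ m := by exact_mod_cast h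
  have h1 : PySem.Int.floordiv (m : Int) 10 = ((m / 10 : Nat) : Int) := by
    exact_mod_cast PySem.Int.floordiv_natCast m 10
  have h2 : PySem.Int.mod (m : Int) 10 = ((m % 10 : Nat) : Int) := by
    exact_mod_cast PySem.Int.mod_natCast m 10
  rw [h1, h2]
  simp only [PySem.Int.toChars]
  have hlt : ¬ ((m : Int) < 0) := by omega
  have hlt2 : ¬ (((m / 10 : Nat) : Int) < 0) := by omega
  have hlt3 : ¬ (((m % 10 : Nat) : Int) < 0) := by omega
  simp only [hlt, hlt2, hlt3, if_false, Int.toNat_natCast]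
  rw [pv_toDigits_step m hm, pv_toDigits_single (m % 10) (Nat.mod_lt _ (by omega))]

-- A's helper on one digit equals B's table lookup
theorem pv_digit_eq : ∀ d : Int, 0 ≤ d → d < 10 →
    obtener_nombre d = (PySem.List.pyGet? pvNames d).getD "" := by
  intro d h1 h2
  interval_cases d <;> decide

theorem pv_join_nil_append : ∀ (l1 l2 : List (List Char)),
    PySem.Chars.join [] (l1 ++ l2) = PySem.Chars.join [] l1 ++ PySem.Chars.join [] l2 := by
  intro l1 l2
  induction l2 using List.reverseRecOn with
  | nil => simp [PySem.Chars.join_nil]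
  | append_singleton l2 x ih =>
    rw [← List.append_assoc, pv_join_singleton_append, pv_join_singleton_append, ih,
      List.append_assoc]

theorem pv_strjoin_append (l1 l2 : List String) :
    PySem.Str.join "" (l1 ++ l2) = PySem.Str.join "" l1 ++ PySem.Str.join "" l2 := by
  apply String.ext
  simp only [PySem.Str.toList_join, String.toList_append, List.map_append]
  have : ("" : String).toList = [] := rfl
  rw [this, pv_join_nil_append]

theorem pv_obtener_map (n : Int) :
    obtener_nombre n = PySem.Str.join "" ((PySem.Int.toChars n).map pvLetra) := by
  show PySem.Str.join ""
      ((PySem.Int.toChars n).foldl (fun acc elemento => acc ++ [pvLetra elemento]) []) = _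
  rw [PySem.List.foldl_append_singleton_eq_map]
  simp

-- A's obtener_nombre satisfies B's divmod recurrence
theorem pv_obtener_step (n : Int) (h : 10 ≤ n) :
    obtener_nombre n = obtener_nombre (PySem.Int.floordiv n 10) ++
      obtener_nombre (PySem.Int.mod n 10) := by
  rw [pv_obtener_map n, pv_obtener_map (PySem.Int.floordiv n 10),
    pv_obtener_map (PySem.Int.mod n 10), pv_toChars_step n h, List.map_append,
    pv_strjoin_append]

theorem pv_div_bounds (n : Int) (c : Int) (h10 : 10 ≤ n) (hub : n < 10 * c) :
    0 ≤ PySem.Int.floordiv n 10 ∧ PySem.Int.floordiv n 10 < c ∧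
      0 ≤ PySem.Int.mod n 10 ∧ PySem.Int.mod n 10 < 10 := by
  have hq := PySem.Int.floordiv_mul_add_mod n 10
  have hr1 := PySem.Int.mod_nonneg n (b := 10) (by norm_num)
  have hr2 := PySem.Int.mod_lt n (b := 10) (by norm_num)
  constructor
  · nlinarith [hq, hr1, hr2]
  refine ⟨by nlinarith, hr1, hr2⟩

theorem pv_spell_eq : ∀ (fuel : Nat) (n : Int), 1 ≤ fuel → 0 ≤ n → n < (10:Int)^fuel →
    obtener_nombre n = pvSpell fuel n := by
  intro fuel
  induction fuel with
  | zero => omega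
  | succ f ih =>
    intro n _ h0 hub
    simp only [pvSpell]
    by_cases hlt : n < 10
    · simp only [hlt, if_true]
      exact pv_digit_eq n h0 hlt
    · simp only [hlt, if_false]
      have h10 : 10 ≤ n := by omega
      have hub' : n < 10 * (10:Int)^f := by
        have : (10:Int)^(f+1) = 10 * (10:Int)^f := by ring
        omega
      obtain ⟨hq0, hq1, hr0, hr1⟩ := pv_div_bounds n ((10:Int)^f) h10 hub'
      have hf : 1 ≤ f := by
        rcases Nat.eq_zero_or_pos f with hf0 | hf0
        · subst hf0; simp at hub'; omega
        · omega
      rw [pv_obtener_step n h10, ih (PySem.Int.floordiv n 10) hf hq0 hq1,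
        pv_digit_eq (PySem.Int.mod n 10) hr0 hr1]

theorem pv_name_len : ∀ d : Int, 0 ≤ d → d < 10 →
    3 ≤ PySem.Str.len (obtener_nombre d) ∧ PySem.Str.len (obtener_nombre d) ≤ 5 := by
  intro d h1 h2
  interval_cases d <;> exact ⟨by decide, by decide⟩

theorem pv_len_bounds : ∀ (fuel : Nat) (n : Int), 1 ≤ fuel → 0 ≤ n → n < (10:Int)^fuel →
    3 ≤ PySem.Str.len (obtener_nombre n) ∧ PySem.Str.len (obtener_nombre n) ≤ 5 * fuel := by
  intro fuel
  induction fuel with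
  | zero => omega
  | succ f ih =>
    intro n _ h0 hub
    by_cases hlt : n < 10
    · have := pv_name_len n h0 hlt
      constructor
      · exact this.1
      · have : PySem.Str.len (obtener_nombre n) ≤ 5 := this.2
        push_cast
        omega
    · have h10 : 10 ≤ n := by omega
      have hub' : n < 10 * (10:Int)^f := by
        have : (10:Int)^(f+1) = 10 * (10:Int)^f := by ring
        omega
      obtain ⟨hq0, hq1, hr0, hr1⟩ := pv_div_bounds n ((10:Int)^f) h10 hub'
      have hf : 1 ≤ f := by
        rcases Nat.eq_zero_or_pos f with hf0 | hf0
        · subst hf0; simp at hub'; omega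
        · omega
      have hrec := ih (PySem.Int.floordiv n 10) hf hq0 hq1
      have hdig := pv_name_len (PySem.Int.mod n 10) hr0 hr1
      rw [pv_obtener_step n h10, PySem.Str.len_append]
      push_cast
      omega
def pvChainOk : Nat → Int → Bool
  | 0, L => L == 4
  | k+1, L => L == 4 ||
      (decide (0 ≤ L ∧ L < (10:Int)^12) && pvChainOk k (PySem.Str.len (pvSpell 12 L)))

theorem pvChainOk_succ (k : Nat) (L : Int) :
    pvChainOk (k+1) L = (L == 4 ||
      (decide (0 ≤ L ∧ L < (10:Int)^12) && pvChainOk k (PySem.Str.len (pvSpell 12 L)))) := rfl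

theorem pv_chain_mono : ∀ (k : Nat) (L : Int), pvChainOk k L = true → pvChainOk (k+1) L = true := by
  intro k
  induction k with
  | zero =>
    intro L h
    simp only [pvChainOk] at h
    rw [pvChainOk_succ]
    simp [h]
  | succ k ih =>
    intro L h
    rw [pvChainOk_succ] at h
    rw [pvChainOk_succ]
    simp only [Bool.or_eq_true, Bool.and_eq_true] at h ⊢
    rcases h with h | ⟨h1, h2⟩
    · exact Or.inl h
    · exact Or.inr ⟨h1, ih _ h2⟩

theorem pv_chain_le (k k' : Nat) (L : Int) (h : k ≤ k') (hk : pvChainOk k L = true) :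
    pvChainOk k' L = true := by
  induction k' with
  | zero =>
    have : k = 0 := by omega
    subst this; exact hk
  | succ k' ih =>
    rcases Nat.lt_or_ge k (k'+1) with hlt | hge
    · exact pv_chain_mono k' L (ih (by omega))
    · have : k = k' + 1 := by omega
      subst this; exact hk

theorem pv_chain_start : ∀ (m : Nat), m < 51 → 3 ≤ m → pvChainOk 20 (m : Int) = true := by
  decide

theorem pv_pyGet_last (l : List String) (x : String) :
    PySem.List.pyGet? (l ++ [x]) (-1) = some x := by
  simp [PySem.List.pyGet?, PySem.List.pyIdx?]

theorem pv_nolLoop_succ (F : Nat) (l : List String) :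
    nolLoop (F+1) l =
      if PySem.Str.len ((PySem.List.pyGet? l (-1)).getD "") ≠ 4 then
        nolLoop F (l ++ [obtener_nombre (PySem.Str.len ((PySem.List.pyGet? l (-1)).getD ""))])
      else l := rfl

theorem pv_nolAlt_succ (F : Nat) (n : Int) :
    nolAlt (F+1) n =
      if PySem.Str.len (pvSpell 12 n) = 4 then [pvSpell 12 n, "four"]
      else pvSpell 12 n :: nolAlt F (PySem.Str.len (pvSpell 12 n)) := rfl

theorem pv_sim : ∀ (k : Nat), ∀ (fuel : Nat) (n : Int) (acc : List String),
    0 ≤ n → n < (10:Int)^12 →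
    pvChainOk k (PySem.Str.len (obtener_nombre n)) = true → k < fuel →
    nolLoop fuel (acc ++ [obtener_nombre n]) ++ ["four"] = acc ++ nolAlt fuel n := by
  intro k
  induction k with
  | zero =>
    intro fuel n acc h0 hb hch hk
    simp only [pvChainOk, beq_iff_eq] at hch
    obtain ⟨F, rfl⟩ : ∃ F, fuel = F + 1 := ⟨fuel - 1, by omega⟩
    have hs : obtener_nombre n = pvSpell 12 n := pv_spell_eq 12 n (by omega) h0 hb
    rw [pv_nolLoop_succ, pv_nolAlt_succ, pv_pyGet_last]
    rw [← hs]
    simp only [PySem.Str.len, String.length_toList] at hch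
    simp [hch]
  | succ k ih =>
    intro fuel n acc h0 hb hch hk
    obtain ⟨F, rfl⟩ : ∃ F, fuel = F + 1 := ⟨fuel - 1, by omega⟩
    have hs : obtener_nombre n = pvSpell 12 n := pv_spell_eq 12 n (by omega) h0 hb
    rw [pv_nolLoop_succ, pv_nolAlt_succ, pv_pyGet_last]
    rw [← hs]
    by_cases h4 : PySem.Str.len (obtener_nombre n) = 4
    · simp only [PySem.Str.len, String.length_toList] at h4
      simp [h4]
    · rw [pvChainOk_succ] at hch
      simp only [Bool.or_eq_true, Bool.and_eq_true, beq_iff_eq, decide_eq_true_eq] at hch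
      rcases hch with hc | ⟨⟨hL0, hL1⟩, hc⟩
      · exact absurd hc h4
      · rw [← pv_spell_eq 12 (PySem.Str.len (obtener_nombre n)) (by omega) hL0 hL1] at hc
        simp only [Option.getD_some]
        rw [if_pos h4]
        have hrec := ih F (PySem.Str.len (obtener_nombre n)) (acc ++ [obtener_nombre n])
          hL0 hL1 hc (by omega)
        rw [hrec]
        simp only [PySem.Str.len, String.length_toList] at h4
        simp
        intro h
        exact absurd h h4

-- ===== VERDICT (by name: the statement is the Claim_ definition above) =====
theorem numbersOfLetters_spec : Claim_equal_numbersOfLetters := by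
  intro n hdom hpre
  unfold Spec_numbersOfLetters numbersOfLetters numbersOfLetters_alt
  have hb : n < (10:Int)^12 := by
    unfold Dom_numbersOfLetters pvDomInt at hdom
    simp at hdom; norm_num; omega
  have h10 : n < (10:Int)^10 := by
    unfold Dom_numbersOfLetters pvDomInt at hdom
    simp at hdom; norm_num; omega
  have hlen := pv_len_bounds 10 n (by omega) hpre h10
  have hchain : pvChainOk 99 (PySem.Str.len (obtener_nombre n)) = true := by
    apply pv_chain_le 20 99 _ (by omega)
    have h3 : (3:Int) ≤ PySem.Str.len (obtener_nombre n) := hlen.1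
    have h50 : PySem.Str.len (obtener_nombre n) ≤ 50 := by omega
    have : PySem.Str.len (obtener_nombre n) = ((PySem.Str.len (obtener_nombre n)).toNat : Int) := by omega
    rw [this]
    exact pv_chain_start _ (by omega) (by omega)
  have := pv_sim 99 100 n [] hpre hb hchain (by omega)
  simpa using this
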